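-- pv_equiv track=rewrite | github.com/SiwakornJew/BandProtocolTest | BossBaby's_Revenge.py | kind_of_boy
-- ===== SOURCE A (Python) =====
-- def kind_of_boy(bullets):
--     if bullets[0] == 'R':
--         return "Bad boy"
--
--     count_shoot = 0
--     for i in range(len(bullets)):
--         if bullets[i] == 'S':
--             count_shoot += 1
--         else:
--             count_shoot -= 1
--             if count_shoot < 0:
--                 count_shoot = 0
--
--     return "Good boy" if count_shoot == 0 else "Bad boy"
-- ===== SOURCE B (Python) =====
-- def kind_of_boy(bullets):
--     if bullets[0] == 'R':
--         return "Bad boy"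
--     s = 0
--     for c in reversed(bullets):
--         s += 1 if c == 'S' else -1
--         if s > 0:
--             return "Bad boy"
--     return "Good boy"
-- ===== Notes on version B (the rewrite author's own statement) =====
-- stated objective: alternative
-- what changed: Replaces the left-to-right clamped counter with a right-to-left running-sum scan that classifies the boy as bad early as soon as some suffix has more shoots than reloads (the max-suffix-sum characterization of the clamped counter).
import Mathlib
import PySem

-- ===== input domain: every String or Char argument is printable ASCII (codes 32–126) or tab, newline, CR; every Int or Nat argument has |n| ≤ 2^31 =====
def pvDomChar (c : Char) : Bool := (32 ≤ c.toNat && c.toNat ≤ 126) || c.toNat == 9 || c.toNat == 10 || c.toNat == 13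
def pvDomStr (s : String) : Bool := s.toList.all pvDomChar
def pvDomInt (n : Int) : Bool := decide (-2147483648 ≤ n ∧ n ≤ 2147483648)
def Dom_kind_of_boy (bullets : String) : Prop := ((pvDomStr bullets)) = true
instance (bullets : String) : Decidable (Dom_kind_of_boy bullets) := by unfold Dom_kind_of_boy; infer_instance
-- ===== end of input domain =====

-- B replaces A's left-to-right clamped counter with a right-to-left running-sum scan that
-- stops early once some suffix has more shoot characters than others (alternative decomposition, same cost).


-- ===== PORT A =====
def kind_of_boy (bullets : String) : String :=
  if PySem.Str.pyGet? bullets 0 = some 'R' then "Bad boy"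
  else if (PySem.List.pyRange 0 (PySem.Str.len bullets) 1).foldl
        (fun count_shoot i =>
          if PySem.List.pyGetD bullets.toList i ' ' = 'S' then count_shoot + 1
          else
            let count_shoot := count_shoot - 1
            if count_shoot < 0 then 0 else count_shoot) (0 : Int) = 0
  then "Good boy" else "Bad boy"

-- ===== PORT B =====
-- B's loop: right-to-left running sum, early exit when it goes positive.
def kindGo : List Char → Int → String
  | [], _ => "Good boy"
  | c :: r, s =>
    let s' := s + (if c = 'S' then 1 else -1)
    if s' > 0 then "Bad boy" else kindGo r s'

def kind_of_boy_alt (bullets : String) : String :=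
  if PySem.Str.pyGet? bullets 0 = some 'R' then "Bad boy"
  else kindGo bullets.toList.reverse 0

-- ===== PRECONDITION & SPEC =====
-- Pre_ excludes only the empty string, on which Python A (and B) raise IndexError at bullets[0].
def Pre_kind_of_boy (bullets : String) : Prop := bullets ≠ ""
instance (bullets : String) : Decidable (Pre_kind_of_boy bullets) := by unfold Pre_kind_of_boy; infer_instance
def pvWitness_kind_of_boy : String := "SR"

def Spec_kind_of_boy (bullets : String) (out : String) : Prop := out = kind_of_boy_alt bullets
instance (bullets : String) (out : String) : Decidable (Spec_kind_of_boy bullets out) := by unfold Spec_kind_of_boy; infer_instance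

-- ===== CLAIM (what is proved, stated in full; the proofs are below) =====
def Claim_equal_kind_of_boy : Prop := ∀ (bullets : String), Dom_kind_of_boy bullets → Pre_kind_of_boy bullets → Spec_kind_of_boy bullets (kind_of_boy bullets)

-- ===== LEMMAS AND PROOFS =====

-- A's loop step (clamped counter).
def kindStep (count : Int) (ch : Char) : Int :=
  if ch = 'S' then count + 1 else if count - 1 < 0 then 0 else count - 1

theorem kindStep_nonneg (a : Int) (ha : 0 ≤ a) (ch : Char) : 0 ≤ kindStep a ch := by
  unfold kindStep; split_ifs <;> omega

theorem foldl_kindStep_nonneg (l : List Char) (a : Int) (ha : 0 ≤ a) :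
    0 ≤ l.foldl kindStep a := by
  induction l generalizing a with
  | nil => simpa using ha
  | cons c t ih => exact ih _ (kindStep_nonneg a ha c)

-- Main invariant: the right-to-left scan with running sum s (s ≤ 0) classifies as good
-- exactly when s + (clamped-counter value of the original string) is ≤ 0.
theorem kindGo_eq (r : List Char) (s : Int) (hs : s ≤ 0) :
    kindGo r s = if s + r.reverse.foldl kindStep 0 ≤ 0 then "Good boy" else "Bad boy" := by
  induction r generalizing s with
  | nil => simp [kindGo, hs]
  | cons c t ih =>
    have hM : 0 ≤ t.reverse.foldl kindStep 0 := foldl_kindStep_nonneg _ 0 le_rfl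
    rw [List.reverse_cons, List.foldl_append]
    simp only [List.foldl_cons, List.foldl_nil]
    by_cases hc : c = 'S'
    · subst hc
      simp only [kindGo, kindStep, reduceIte]
      by_cases h1 : s + 1 > 0
      · rw [if_pos h1, if_neg (by omega)]
      · rw [if_neg h1, ih _ (by omega)]
        congr 1
        simp only [eq_iff_iff]
        constructor <;> intro h <;> omega
    · simp only [kindGo, kindStep, if_neg hc]
      rw [if_neg (show ¬ s + -1 > 0 by omega), ih _ (by omega)]
      congr 1
      simp only [eq_iff_iff]
      split_ifs with h2 <;> (constructor <;> intro h <;> omega)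

-- A's fold over indices equals the structural fold of kindStep over the characters.
theorem kindA_fold (bullets : String) :
    (PySem.List.pyRange 0 (PySem.Str.len bullets) 1).foldl
        (fun count_shoot i =>
          if PySem.List.pyGetD bullets.toList i ' ' = 'S' then count_shoot + 1
          else
            let count_shoot := count_shoot - 1
            if count_shoot < 0 then 0 else count_shoot) (0 : Int)
      = bullets.toList.foldl kindStep 0 := by
  simp only [PySem.Str.len_eq]
  exact PySem.List.foldl_pyRange_zero_pyGetD' bullets.toList ' ' kindStep 0

-- ===== VERDICT (by name: the statement is the Claim_ definition above) =====
theorem kind_of_boy_spec : Claim_equal_kind_of_boy := by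
  intro bullets _ _
  unfold Spec_kind_of_boy kind_of_boy kind_of_boy_alt
  by_cases hg : PySem.Str.pyGet? bullets 0 = some 'R'
  · rw [if_pos hg, if_pos hg]
  · rw [if_neg hg, if_neg hg, kindGo_eq _ 0 le_rfl, List.reverse_reverse, kindA_fold]
    simp only [zero_add]
    have h0 : 0 ≤ bullets.toList.foldl kindStep 0 := foldl_kindStep_nonneg _ 0 le_rfl
    by_cases hz : bullets.toList.foldl kindStep 0 = 0
    · simp [hz]
    · rw [if_neg hz, if_neg (by omega)]
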